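-- pv_equiv track=rewrite | github.com/mforman/advent-of-code | 2018/02.py | findTwoAndThrees
-- ===== SOURCE A (Python) =====
-- def findTwoAndThrees(s):
--     dictionary = {}
--     for c in s:
--         if c in dictionary:
--             dictionary[c] += 1
--         else:
--             dictionary[c] = 1
--
--     result = [0,0]
--
--     for val in dictionary.values():
--         if val == 2:
--             result[0] = 1
--         elif val == 3:
--             result[1] = 1
--
--     return result
-- ===== SOURCE B (Python) =====
-- def findTwoAndThrees(s):
--     chars = set(s)
--     return [1 if any(s.count(c) == 2 for c in chars) else 0,
--             1 if any(s.count(c) == 3 for c in chars) else 0]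
-- ===== Notes on version B (the rewrite author's own statement) =====
-- stated objective: idiomatic
-- what changed: Drops the frequency dictionary: B takes the set of distinct characters and uses repeated s.count(c) scans inside two any(...) expressions, instead of A's build-table-then-scan-values two-pass.
import Mathlib
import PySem

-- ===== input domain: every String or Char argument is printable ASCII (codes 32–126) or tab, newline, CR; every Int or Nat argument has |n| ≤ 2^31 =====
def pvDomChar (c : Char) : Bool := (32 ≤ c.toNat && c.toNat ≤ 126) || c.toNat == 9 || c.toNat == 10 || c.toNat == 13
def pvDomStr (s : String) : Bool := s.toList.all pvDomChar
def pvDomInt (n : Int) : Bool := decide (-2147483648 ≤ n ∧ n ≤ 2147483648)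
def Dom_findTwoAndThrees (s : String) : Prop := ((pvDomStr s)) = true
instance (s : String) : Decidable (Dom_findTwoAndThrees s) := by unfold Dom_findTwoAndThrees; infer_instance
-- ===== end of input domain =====

-- B drops A's frequency dictionary: it scans the string once per distinct character with
-- s.count inside two any(...) expressions (objective: idiomatic; same return value, no speed claim).


-- ===== PORT A =====
def findTwoAndThrees (s : String) : List Int :=
  let dictionary : PySem.Dict Char Int :=
    s.toList.foldl (fun d c =>
      if d.contains c then d.insert c (d.getD c 0 + 1) else d.insert c 1)
      PySem.Dict.empty
  let result : List Int := [0, 0]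
  dictionary.values.foldl (fun result val =>
    if val == 2 then PySem.List.pySetD result 0 1
    else if val == 3 then PySem.List.pySetD result 1 1
    else result) result

-- ===== PORT B =====
def findTwoAndThrees_alt (s : String) : List Int :=
  let chars : PySem.Set Char := PySem.Set.ofList s.toList
  [if chars.any (fun c => PySem.Str.count s (String.ofList [c]) == 2) then 1 else 0,
   if chars.any (fun c => PySem.Str.count s (String.ofList [c]) == 3) then 1 else 0]

-- ===== PRECONDITION & SPEC =====
def Spec_findTwoAndThrees (s : String) (out : List Int) : Prop := out = findTwoAndThrees_alt s
instance (s : String) (out : List Int) : Decidable (Spec_findTwoAndThrees s out) := by unfold Spec_findTwoAndThrees; infer_instance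

-- ===== CLAIM (what is proved, stated in full; the proofs are below) =====
def Claim_equal_findTwoAndThrees : Prop := ∀ (s : String), Dom_findTwoAndThrees s → Spec_findTwoAndThrees s (findTwoAndThrees s)

-- ===== LEMMAS AND PROOFS =====

-- A's counting step (if c in d: d[c] += 1 else: d[c] = 1) is exactly Dict.modify c 0 (· + 1).
lemma stepA_eq_modify :
    (fun (d : PySem.Dict Char Int) c =>
      if d.contains c then d.insert c (d.getD c 0 + 1) else d.insert c 1)
    = fun d c => d.modify c 0 (· + 1) := by
  funext d c
  by_cases h : d.contains c = true
  · simp [PySem.Dict.modify, h]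
  · have h' : d.contains c = false := by simpa using h
    have : d.getD c 0 = 0 := by
      simp [PySem.Dict.getD, (PySem.Dict.get?_eq_none_iff_contains d c).2 h']
    simp [PySem.Dict.modify, h', this]

-- the body of A's second loop, named for the proofs (identical to the port's lambda)
def resStep (result : List Int) (val : Int) : List Int :=
  if val == 2 then PySem.List.pySetD result 0 1
  else if val == 3 then PySem.List.pySetD result 1 1
  else result

-- A's result loop over the dict's values sets the two cells monotonically to 1.
lemma fold2 (vals : List Int) : ∀ (a b : Int),
    vals.foldl resStep [a, b]
    = [if vals.any (· == 2) then 1 else a, if vals.any (· == 3) then 1 else b] := by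
  induction vals with
  | nil => intro a b; simp
  | cons v rest ih =>
    intro a b
    rw [List.foldl_cons]
    by_cases h2 : v = 2
    · rw [show resStep [a, b] v = [1, b] by simp [resStep, h2, pysem], ih]
      simp [h2]
    · by_cases h3 : v = 3
      · rw [show resStep [a, b] v = [a, 1] by simp [resStep, h3, pysem], ih]
        simp [h3]
      · rw [show resStep [a, b] v = [a, b] by simp [resStep, h2, h3], ih]
        simp [h2, h3]

-- Python's s.count(c) for a single character c is the character count.
lemma go_single (c : Char) : ∀ (l : List Char) (fuel acc : Nat), l.length ≤ fuel →
    PySem.Chars.count.go [c] fuel l acc = acc + l.count c := by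
  intro l
  induction l with
  | nil => intro fuel acc _; cases fuel <;> simp [PySem.Chars.count.go]
  | cons h t ih =>
    intro fuel acc hle
    cases fuel with
    | zero => simp at hle
    | succ f =>
      by_cases hc : h = c
      · simp [PySem.Chars.count.go, List.isPrefixOf, hc, ih f (acc+1) (by simpa using hle)]
        omega
      · simp [PySem.Chars.count.go, List.isPrefixOf, hc, ih f acc (by simpa using hle),
          Ne.symm hc]

lemma chars_count_single (l : List Char) (c : Char) : PySem.Chars.count l [c] = l.count c := by
  simp [PySem.Chars.count, go_single c l l.length 0 le_rfl]

lemma castBeq2 (n : Nat) : ((n : Int) == 2) = (n == 2) := by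
  by_cases h : n = 2 <;> simp [h] <;> omega

lemma castBeq3 (n : Nat) : ((n : Int) == 3) = (n == 3) := by
  by_cases h : n = 3 <;> simp [h] <;> omega

-- ===== VERDICT (by name: the statement is the Claim_ definition above) =====
theorem findTwoAndThrees_spec : Claim_equal_findTwoAndThrees := by
  intro s _
  simp only [Spec_findTwoAndThrees, findTwoAndThrees, findTwoAndThrees_alt]
  rw [stepA_eq_modify, ← PySem.Dict.counter_eq_foldl]
  have hvals : (PySem.Dict.counter s.toList).values
      = (PySem.Set.ofList s.toList).map (fun c => ((List.count c s.toList : Nat) : Int)) := by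
    simp only [PySem.Dict.values, PySem.Dict.items_counter, List.map_map]
    rfl
  rw [hvals, show (fun (result : List Int) (val : Int) =>
    if val == 2 then PySem.List.pySetD result 0 1
    else if val == 3 then PySem.List.pySetD result 1 1
    else result) = resStep from rfl, fold2]
  simp only [List.any_map, Function.comp_def, PySem.Str.count_eq, String.toList_ofList,
    chars_count_single, castBeq2, castBeq3, List.count_eq_countP]
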